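-- pv_equiv track=rewrite | github.com/danielgrimland/Sea_Urchin_Endomesoderm_GRN | Old Programs/Permutation Experiment Generator.py | Create_Experiment_Timestamp_Lines
-- ===== SOURCE A (Python) =====
-- def Create_Experiment_Timestamp_Lines(stamp_list, exp_num, stamp_num):
--     constraints = stamp_list[exp_num][stamp_num]
--
--     if (len(constraints) == 0):
--         return ""
--
--     none_counter = 0
--     for e in constraints:
--         if (e == None):
--             none_counter += 1
--
--     restriction = f"$Restriction_{exp_num + 1}_{stamp_num + 1} :=\n" + "{\n\n"
--
--     if (len(constraints) != 1):
--         for i in range(len(constraints) - 1):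
--             if (constraints[i] != None):
--                 restriction += f"   {constraints[i][0]} = {constraints[i][1]} and\n"
--
--     if (constraints[-1] != None):
--         restriction += f"   {constraints[-1][0]} = {constraints[-1][1]}" + "\n\n};\n\n"
--     else:
--         if (none_counter != len(constraints)):
--             restriction = restriction[:-5] + "\n\n};\n\n"
--         else:
--             restriction += "\n\n};\n\n"
--
--     return restriction
-- ===== SOURCE B (Python) =====
-- def Create_Experiment_Timestamp_Lines(stamp_list, exp_num, stamp_num):
--     constraints = stamp_list[exp_num][stamp_num]
--
--     if len(constraints) == 0:
--         return ""
--
--     lines = [f"   {e[0]} = {e[1]}" for e in constraints if e != None]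
--
--     header = f"$Restriction_{exp_num + 1}_{stamp_num + 1} :=\n" + "{\n\n"
--
--     if lines:
--         return header + " and\n".join(lines) + "\n\n};\n\n"
--     return header + "\n\n};\n\n"
-- ===== Notes on version B (the rewrite author's own statement) =====
-- stated objective: simpler
-- what changed: B collects the formatted lines of all non-None constraints with a single filter-comprehension and joins them with ' and\n', removing A's None-count pass, the separate loop over all-but-last, the last-element special cases and the [:-5] slice cleanup.
import Mathlib
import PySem

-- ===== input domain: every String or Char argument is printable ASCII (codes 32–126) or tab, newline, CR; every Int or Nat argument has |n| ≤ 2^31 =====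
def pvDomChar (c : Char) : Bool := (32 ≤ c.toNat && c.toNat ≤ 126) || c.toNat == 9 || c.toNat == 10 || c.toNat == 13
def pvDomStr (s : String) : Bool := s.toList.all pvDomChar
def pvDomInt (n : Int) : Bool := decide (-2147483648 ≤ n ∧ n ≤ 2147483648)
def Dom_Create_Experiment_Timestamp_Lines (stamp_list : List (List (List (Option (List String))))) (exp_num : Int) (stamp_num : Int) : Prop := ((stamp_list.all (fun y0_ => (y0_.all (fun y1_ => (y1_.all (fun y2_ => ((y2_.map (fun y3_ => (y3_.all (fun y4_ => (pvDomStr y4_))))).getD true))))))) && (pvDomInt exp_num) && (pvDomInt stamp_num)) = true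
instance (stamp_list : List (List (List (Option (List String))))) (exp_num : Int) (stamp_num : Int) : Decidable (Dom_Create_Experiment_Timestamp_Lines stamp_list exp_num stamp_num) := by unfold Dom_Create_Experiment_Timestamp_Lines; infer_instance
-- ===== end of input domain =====

-- B replaces A's None-count pass, last-element special cases and [:-5] slice cleanup by a
-- filter-then-join of the formatted lines (objective: simpler).

-- ===== PORT A =====
-- f"   {e[0]} = {e[1]}" — the SAME f-string appears in Source A and Source B, so both ports share this
-- helper (on List Char; e[0]/e[1] via pyGetD — total only under Pre_)
def pvFmtA (e : List String) : List Char :=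
  "   ".toList ++ (PySem.List.pyGetD e (0 : Int) "").toList ++ " = ".toList
    ++ (PySem.List.pyGetD e (1 : Int) "").toList

def Create_Experiment_Timestamp_Lines (stamp_list : List (List (List (Option (List String))))) (exp_num : Int) (stamp_num : Int) : String :=
  let constraints := PySem.List.pyGetD (PySem.List.pyGetD stamp_list exp_num []) stamp_num []
  if constraints.length = 0 then "" else
  let none_counter : Int := constraints.foldl (fun c e => if e = none then c + 1 else c) 0
  let restriction : List Char :=
    "$Restriction_".toList ++ PySem.Int.toChars (exp_num + 1) ++ "_".toList
      ++ PySem.Int.toChars (stamp_num + 1) ++ " :=\n".toList ++ "{\n\n".toList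
  let restriction :=
    if constraints.length ≠ 1 then
      (PySem.List.pyRange 0 ((constraints.length : Int) - 1) 1).foldl
        (fun r i =>
          match PySem.List.pyGetD constraints i none with
          | some e => r ++ pvFmtA e ++ " and\n".toList
          | none => r) restriction
    else restriction
  let restriction :=
    match PySem.List.pyGetD constraints (-1) none with
    | some e => restriction ++ pvFmtA e ++ "\n\n};\n\n".toList
    | none =>
      if none_counter ≠ (constraints.length : Int) then
        PySem.List.slice restriction none (some (-5)) ++ "\n\n};\n\n".toList
      else
        restriction ++ "\n\n};\n\n".toList
  String.ofList restriction

-- ===== PORT B =====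
def Create_Experiment_Timestamp_Lines_alt (stamp_list : List (List (List (Option (List String))))) (exp_num : Int) (stamp_num : Int) : String :=
  let constraints := PySem.List.pyGetD (PySem.List.pyGetD stamp_list exp_num []) stamp_num []
  if constraints.length = 0 then "" else
  let lines := constraints.filterMap (fun e => e.map pvFmtA)
  let header : List Char :=
    "$Restriction_".toList ++ PySem.Int.toChars (exp_num + 1) ++ "_".toList
      ++ PySem.Int.toChars (stamp_num + 1) ++ " :=\n".toList ++ "{\n\n".toList
  if lines ≠ [] then
    String.ofList (header ++ PySem.Chars.join " and\n".toList lines ++ "\n\n};\n\n".toList)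
  else
    String.ofList (header ++ "\n\n};\n\n".toList)

-- ===== PRECONDITION & SPEC =====
-- Pre_ = exactly where A returns: valid (possibly negative) indices into stamp_list and its row,
-- and every non-None constraint has at least two entries (else e[0]/e[1] raises IndexError).
def Pre_Create_Experiment_Timestamp_Lines (stamp_list : List (List (List (Option (List String))))) (exp_num : Int) (stamp_num : Int) : Prop :=
  PySem.Raise.InRange stamp_list.length exp_num ∧
  PySem.Raise.InRange (PySem.List.pyGetD stamp_list exp_num []).length stamp_num ∧
  ((PySem.List.pyGetD (PySem.List.pyGetD stamp_list exp_num []) stamp_num []).all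
      (fun e => e.elim true (fun x => decide (2 ≤ x.length)))) = true
instance (stamp_list : List (List (List (Option (List String))))) (exp_num : Int) (stamp_num : Int) : Decidable (Pre_Create_Experiment_Timestamp_Lines stamp_list exp_num stamp_num) := by unfold Pre_Create_Experiment_Timestamp_Lines; infer_instance

def pvWitness_Create_Experiment_Timestamp_Lines : List (List (List (Option (List String)))) × Int × Int :=
  ([[[some ["a", "b"], none, some ["x", "y"]]]], 0, 0)

def Spec_Create_Experiment_Timestamp_Lines (stamp_list : List (List (List (Option (List String))))) (exp_num : Int) (stamp_num : Int) (out : String) : Prop := out = Create_Experiment_Timestamp_Lines_alt stamp_list exp_num stamp_num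
instance (stamp_list : List (List (List (Option (List String))))) (exp_num : Int) (stamp_num : Int) (out : String) : Decidable (Spec_Create_Experiment_Timestamp_Lines stamp_list exp_num stamp_num out) := by unfold Spec_Create_Experiment_Timestamp_Lines; infer_instance

-- ===== CLAIM (what is proved, stated in full; the proofs are below) =====
def Claim_equal_Create_Experiment_Timestamp_Lines : Prop := ∀ (stamp_list : List (List (List (Option (List String))))) (exp_num : Int) (stamp_num : Int), Dom_Create_Experiment_Timestamp_Lines stamp_list exp_num stamp_num → Pre_Create_Experiment_Timestamp_Lines stamp_list exp_num stamp_num → Spec_Create_Experiment_Timestamp_Lines stamp_list exp_num stamp_num (Create_Experiment_Timestamp_Lines stamp_list exp_num stamp_num)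

-- ===== LEMMAS AND PROOFS =====

-- A's inner loop over range(len-1) appends "line and\n" for every non-None prefix element
theorem pvLoopA (C : List (Option (List String))) (n : Nat) (hn : n ≤ C.length) (acc : List Char) :
    ((List.range n).map (Nat.cast : Nat → Int)).foldl
        (fun r i =>
          match PySem.List.pyGetD C i none with
          | some e => r ++ pvFmtA e ++ " and\n".toList
          | none => r) acc
      = acc ++ (((C.take n).filterMap (fun e => e.map pvFmtA)).map (· ++ " and\n".toList)).flatten := by
  induction n generalizing acc with
  | zero => simp
  | succ m ih =>
    have hm : m < C.length := by omega
    rw [List.range_succ, List.map_append, List.foldl_append]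
    rw [ih (by omega)]
    have : PySem.List.pyGetD C ((m : Nat) : Int) none = C[m] := by
      rw [PySem.List.pyGetD_natCast]; simp [List.getD, hm]
    simp only [List.map_cons, List.map_nil, List.foldl_cons, List.foldl_nil, this]
    rw [List.take_add_one, List.getElem?_eq_getElem hm]
    cases h : C[m] with
    | none => simp [List.filterMap_append]
    | some e => simp [List.filterMap_append]

theorem pvJoin_concat (sep z : List Char) (ys : List (List Char)) :
    PySem.Chars.join sep (ys ++ [z]) = ((ys.map (· ++ sep)).flatten) ++ z := by
  induction ys with
  | nil => simp [PySem.Chars.join_singleton]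
  | cons y ys ih =>
    cases ys with
    | nil => simp [PySem.Chars.join_cons_cons, PySem.Chars.join_singleton]
    | cons w ws =>
      simp only [List.cons_append] at ih ⊢
      rw [PySem.Chars.join_cons_cons, ih]
      simp

theorem pvCount_none (C : List (Option (List String))) :
    (C.foldl (fun c e => if e = none then c + 1 else c) (0 : Int)) = (C.countP (fun e => e = none) : Int) := by
  induction C using List.reverseRecOn with
  | nil => simp
  | append_singleton l x ih =>
    rw [List.foldl_append, ih, List.countP_append]
    by_cases h : x = none <;> simp [h]

theorem pvAllNone_iff (C : List (Option (List String))) :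
    ((C.countP (fun e => e = none) : Int) = (C.length : Int)) ↔ C.filterMap (fun e => e.map pvFmtA) = [] := by
  rw [Int.ofNat_inj, List.countP_eq_length, List.filterMap_eq_nil_iff]
  constructor
  · intro h e he; have := h e he; simp at this; simp [this]
  · intro h e he; have := h e he; cases e <;> simp_all

-- the core: A = B for every value of "constraints"
theorem pvMain (C : List (Option (List String))) (hdr : List Char) :
    (if C.length = 0 then "" else
      let none_counter : Int := C.foldl (fun c e => if e = none then c + 1 else c) 0
      let r :=
        if C.length ≠ 1 then
          (PySem.List.pyRange 0 ((C.length : Int) - 1) 1).foldl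
            (fun r i =>
              match PySem.List.pyGetD C i none with
              | some e => r ++ pvFmtA e ++ " and\n".toList
              | none => r) hdr
        else hdr
      let r :=
        match PySem.List.pyGetD C (-1) none with
        | some e => r ++ pvFmtA e ++ "\n\n};\n\n".toList
        | none =>
          if none_counter ≠ (C.length : Int) then
            PySem.List.slice r none (some (-5)) ++ "\n\n};\n\n".toList
          else r ++ "\n\n};\n\n".toList
      String.ofList r)
    = (if C.length = 0 then "" else
        let lines := C.filterMap (fun e => e.map pvFmtA)
        if lines ≠ [] then
          String.ofList (hdr ++ PySem.Chars.join " and\n".toList lines ++ "\n\n};\n\n".toList)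
        else String.ofList (hdr ++ "\n\n};\n\n".toList)) := by
  rcases List.eq_nil_or_concat C with hC | ⟨I, t, hC⟩
  · simp [hC]
  · rw [List.concat_eq_append] at hC
    subst hC
    have hlen : (I ++ [t]).length = I.length + 1 := by simp
    have hne : (I ++ [t]).length ≠ 0 := by omega
    simp only [if_neg hne]
    -- rewrite the loop result
    have hrange : PySem.List.pyRange 0 (((I ++ [t]).length : Int) - 1) 1
        = (List.range I.length).map (Nat.cast : Nat → Int) := by
      have : (((I ++ [t]).length : Int) - 1) = ((I.length : Nat) : Int) := by
        simp [hlen]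
      rw [this, PySem.List.pyRange_zero_natCast]
    have htake : (I ++ [t]).take I.length = I := by
      simp
    have hloop : (if (I ++ [t]).length ≠ 1 then
          (PySem.List.pyRange 0 (((I ++ [t]).length : Int) - 1) 1).foldl
            (fun r i =>
              match PySem.List.pyGetD (I ++ [t]) i none with
              | some e => r ++ pvFmtA e ++ " and\n".toList
              | none => r) hdr
        else hdr)
        = hdr ++ ((I.filterMap (fun e => e.map pvFmtA)).map (· ++ " and\n".toList)).flatten := by
      by_cases h1 : (I ++ [t]).length = 1
      · have hI : I = [] := by
          cases I with
          | nil => rfl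
          | cons a as => simp at h1
        simp [hI]
      · rw [if_pos h1, hrange, pvLoopA (I ++ [t]) I.length (by simp), htake]
    rw [hloop, pvCount_none, PySem.List.pyGetD_neg_one_append_singleton]
    cases t with
    | some x =>
      -- last constraint is non-None: both end "... line\n\n};\n\n"
      have hlines : (I ++ [some x]).filterMap (fun e => e.map pvFmtA)
          = I.filterMap (fun e => e.map pvFmtA) ++ [pvFmtA x] := by
        simp [List.filterMap_append]
      rw [hlines]
      have hnil : I.filterMap (fun e => e.map pvFmtA) ++ [pvFmtA x] ≠ [] := by simp
      rw [if_pos hnil, pvJoin_concat]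
      simp
    | none =>
      have hlines : (I ++ [(none : Option (List String))]).filterMap (fun e => e.map pvFmtA)
          = I.filterMap (fun e => e.map pvFmtA) := by
        simp [List.filterMap_append]
      rw [hlines]
      by_cases hall : ((I ++ [(none : Option (List String))]).countP (fun e => e = none) : Int)
          = (((I ++ [(none : Option (List String))]).length : Nat) : Int)
      · -- all None: bare header on both sides
        have h0 : I.filterMap (fun e => e.map pvFmtA) = [] := by
          have h1 := (pvAllNone_iff _).1 hall
          rwa [hlines] at h1
        have hno : ∀ x ∈ I, x = none := by
          intro x hx
          have h2 := List.filterMap_eq_nil_iff.mp h0 x hx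
          cases x <;> simp_all
        have hnex : ¬ ∃ x ∈ I, ¬ x = none := by
          rintro ⟨x, hx, hxn⟩; exact hxn (hno x hx)
        simp [h0, hnex]
      · -- some non-None before the last: A slices off the trailing " and\n"
        have hne' : I.filterMap (fun e => e.map pvFmtA) ≠ [] := by
          intro h
          apply hall
          rw [pvAllNone_iff, hlines, h]
        rw [if_pos hall, if_pos hne']
        rcases List.eq_nil_or_concat (I.filterMap (fun e => e.map pvFmtA)) with h0 | ⟨ys, y, hys⟩
        · exact absurd h0 hne'
        · rw [List.concat_eq_append] at hys
          rw [hys, pvJoin_concat]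
          have hflat : ((ys ++ [y]).map (· ++ " and\n".toList)).flatten
              = (ys.map (· ++ " and\n".toList)).flatten ++ y ++ " and\n".toList := by
            simp
          rw [hflat]
          have h5 : (1 : Nat) < 5 := by omega
          rw [PySem.List.slice_to_neg_ofNat _ 5 h5]
          have harr : hdr ++ ((ys.map (· ++ " and\n".toList)).flatten ++ y ++ " and\n".toList)
              = (hdr ++ (ys.map (· ++ " and\n".toList)).flatten ++ y) ++ " and\n".toList := by
            simp
          rw [harr]
          have hlen5 : ((hdr ++ (ys.map (· ++ " and\n".toList)).flatten ++ y) ++ " and\n".toList).length - 5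
              = (hdr ++ (ys.map (· ++ " and\n".toList)).flatten ++ y).length := by
            simp [List.length_append]
            omega
          rw [hlen5, List.take_left' rfl]
          simp

-- ===== VERDICT (by name: the statement is the Claim_ definition above) =====
theorem Create_Experiment_Timestamp_Lines_spec : Claim_equal_Create_Experiment_Timestamp_Lines := by
  intro stamp_list exp_num stamp_num _hDom _hPre
  unfold Spec_Create_Experiment_Timestamp_Lines
  unfold Create_Experiment_Timestamp_Lines Create_Experiment_Timestamp_Lines_alt
  exact pvMain _ _
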